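-- pv_equiv track=rewrite | github.com/paulsbrookes/metastable | src/metastable/calculate_fixed_points.py | _find_duplicate_groups
-- ===== SOURCE A (Python) =====
-- from typing import List, Hashable
--
-- def _find_duplicate_groups(items: List[Hashable]) -> List[List[int]]:
--     index_groups: dict[Hashable, List[int]] = {}
--     for index, obj in enumerate(items):
--         if obj in index_groups:
--             index_groups[obj].append(index)
--         else:
--             index_groups[obj] = [index]
--     groups_of_indexes: List[List[int]] = list(index_groups.values())
--     groups_of_duplicates: List[List[int]] = [
--         group for group in groups_of_indexes if len(group) > 1
--     ]
--     return groups_of_duplicates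
-- ===== SOURCE B (Python) =====
-- from typing import List, Hashable
--
-- def _find_duplicate_groups(items: List[Hashable]) -> List[List[int]]:
--     # Sort-based, no hashing: stable-sort the indices by their item, cut the
--     # sorted index list into runs of equal items, keep the runs of length > 1,
--     # and order the groups by their first (= smallest) index, i.e. by first
--     # occurrence.  Requires the items to be orderable (ints here).
--     order = sorted(range(len(items)), key=lambda i: items[i])
--     runs: List[List[int]] = []
--     for i in order:
--         if runs and items[runs[-1][-1]] == items[i]:
--             runs[-1].append(i)
--         else:
--             runs.append([i])
--     dups = [run for run in runs if len(run) > 1]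
--     dups.sort(key=lambda run: run[0])
--     return dups
-- ===== Notes on version B (the rewrite author's own statement) =====
-- stated objective: alternative
-- what changed: B replaces A's hash-table grouping by comparison sorting: it stable-sorts the indices by their item, cuts the sorted index list into runs of equal items, keeps runs longer than one, and sorts the surviving groups by their first index to restore first-occurrence order.
import Mathlib
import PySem

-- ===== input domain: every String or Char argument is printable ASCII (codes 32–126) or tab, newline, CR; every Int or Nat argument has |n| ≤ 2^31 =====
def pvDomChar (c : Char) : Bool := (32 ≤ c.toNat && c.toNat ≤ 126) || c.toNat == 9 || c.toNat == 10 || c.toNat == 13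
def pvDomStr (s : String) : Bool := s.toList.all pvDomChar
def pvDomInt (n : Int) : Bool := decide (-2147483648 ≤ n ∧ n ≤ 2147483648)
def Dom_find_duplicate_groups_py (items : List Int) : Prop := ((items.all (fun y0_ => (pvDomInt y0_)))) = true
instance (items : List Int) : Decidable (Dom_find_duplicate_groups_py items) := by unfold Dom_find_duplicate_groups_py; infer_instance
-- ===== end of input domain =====

-- B replaces A's hash-table grouping by comparison sorting: stable-sort the indices by item,
-- cut the sorted index list into runs of equal items, keep runs longer than one, and sort the
-- surviving groups by first index (objective: alternative algorithm, no dictionary).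

-- ===== PORT A =====
def find_duplicate_groups_py (items : List Int) : List (List Int) :=
  let index_groups : PySem.Dict Int (List Int) :=
    (PySem.List.enumerate items).foldl
      (fun d p =>
        if d.contains p.2 then d.modify p.2 [] (fun g => g ++ [p.1])
        else d.insert p.2 [p.1])
      PySem.Dict.empty
  let groups_of_indexes : List (List Int) := index_groups.values
  groups_of_indexes.filter (fun g => decide (1 < g.length))

-- ===== PORT B =====
-- `items[i]`, `r[-1]`, `run[0]` are ported with defaults (pyGetD / getLastD): every such access
-- in Source B is on a nonempty list / in-range index, so the default is never used and the port is exact.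
def find_duplicate_groups_py_alt (items : List Int) : List (List Int) :=
  let order : List Int :=
    PySem.List.sorted (PySem.List.pyRange 0 (PySem.List.len items))
      (fun i => PySem.List.pyGetD items i 0)
  let runs : List (List Int) :=
    order.foldl
      (fun runs i =>
        match runs.getLast? with                  -- `if runs and items[runs[-1][-1]] == items[i]`
        | none => runs ++ [[i]]
        | some r =>
          if PySem.List.pyGetD items (r.getLastD 0) 0 == PySem.List.pyGetD items i 0
          then runs.dropLast ++ [r ++ [i]]        -- `runs[-1].append(i)`
          else runs ++ [[i]])
      []
  let dups : List (List Int) := runs.filter (fun run => decide (1 < run.length))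
  PySem.List.sorted dups (fun run => PySem.List.pyGetD run 0 0)

-- ===== PRECONDITION & SPEC =====
def Spec_find_duplicate_groups_py (items : List Int) (out : List (List Int)) : Prop := out = find_duplicate_groups_py_alt items
instance (items : List Int) (out : List (List Int)) : Decidable (Spec_find_duplicate_groups_py items out) := by unfold Spec_find_duplicate_groups_py; infer_instance

-- ===== CLAIM (what is proved, stated in full; the proofs are below) =====
def Claim_equal_find_duplicate_groups_py : Prop := ∀ (items : List Int), Dom_find_duplicate_groups_py items → Spec_find_duplicate_groups_py items (find_duplicate_groups_py items)

-- ===== LEMMAS AND PROOFS =====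

def pvGroups (l : List (Int × Int)) : PySem.Dict Int (List Int) :=
  l.foldl (fun d p => d.modify p.2 [] (fun g => g ++ [p.1])) PySem.Dict.empty

def pvIdxs (l : List (Int × Int)) (k : Int) : List Int :=
  (l.filter (fun p => p.2 == k)).map (fun p => p.1)

-- first occurrences of values of the second argument not already in `seen`, in order
def pvNd (seen : List Int) : List Int → List Int
  | [] => []
  | x :: r => if x ∈ seen then pvNd seen r else x :: pvNd (seen ++ [x]) r

theorem pvSet_update_eq_nd : ∀ (l s : List Int), PySem.Set.update s l = s ++ pvNd s l := by
  intro l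
  induction l with
  | nil => intro s; simp [PySem.Set.update, pvNd]
  | cons x r ih =>
    intro s
    show PySem.Set.update (PySem.Set.add s x) r = _
    by_cases hx : x ∈ s
    · rw [show PySem.Set.add s x = s by simp [PySem.Set.add, PySem.Set.contains, hx]]
      simp [ih s, pvNd, hx]
    · rw [show PySem.Set.add s x = s ++ [x] by simp [PySem.Set.add, PySem.Set.contains, hx]]
      simp [ih (s ++ [x]), pvNd, hx]

theorem pvSet_ofList_eq_nd (l : List Int) : PySem.Set.ofList l = pvNd [] l := by
  have := pvSet_update_eq_nd l []
  simpa [PySem.Set.ofList, PySem.Set.empty] using this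

-- ---------- A-side characterisation (dict grouping) ----------

theorem pvGroupFold_keys (l : List (Int × Int)) :
    (pvGroups l).keys = PySem.Set.ofList (l.map (fun p => p.2)) := by
  have h := PySem.Dict.keys_foldl_modify_key l (fun p => p.2) ([] : List Int)
    (fun _ p g => g ++ [p.1]) PySem.Dict.empty
  simpa [pvGroups, PySem.Dict.keys_empty, PySem.Set.ofList, PySem.Set.update] using h

theorem pvGroupFold_nodup (l : List (Int × Int)) : (pvGroups l).keys.Nodup :=
  PySem.Dict.nodup_keys_foldl_modify_key l (fun p => p.2) ([] : List Int)
    (fun _ p g => g ++ [p.1]) PySem.Dict.empty (by simp [PySem.Dict.keys_empty])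

theorem pvGroupFold_getD (l : List (Int × Int)) (k : Int) :
    (pvGroups l).getD k [] = pvIdxs l k := by
  have h := PySem.Dict.getD_foldl_modify_append (l.map Prod.swap) PySem.Dict.empty k
  rw [List.foldl_map] at h
  simp only [Prod.fst_swap, Prod.snd_swap] at h
  rw [pvGroups, h]
  simp [pvIdxs, List.filter_map, List.map_map, Function.comp_def, PySem.Dict.getD_empty]

theorem pvAssoc_items {ν : Type} (d0 : ν) :
    ∀ l : List (Int × ν), (l.map Prod.fst).Nodup →
      (l.map Prod.fst).map (fun k => (k, (PySem.Dict.mk l).getD k d0)) = l := by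
  intro l
  induction l with
  | nil => intro _; rfl
  | cons kv rest ih =>
    intro hnd
    obtain ⟨k, v⟩ := kv
    simp only [List.map_cons, List.nodup_cons] at hnd ⊢
    have h1 : (PySem.Dict.mk ((k, v) :: rest)).getD k d0 = v := by
      simp [PySem.Dict.getD_eq_get?_getD, PySem.Dict.get?_mk_cons]
    rw [h1]
    congr 1
    rw [List.map_congr_left (g := fun k' => (k', (PySem.Dict.mk rest).getD k' d0))]
    · exact ih hnd.2
    · intro a ha
      have hne : ¬ (k == a) = true := by
        simp only [beq_iff_eq]
        rintro rfl; exact hnd.1 ha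
      simp [PySem.Dict.getD_eq_get?_getD, PySem.Dict.get?_mk_cons, hne]

theorem pvGroups_values (l : List (Int × Int)) :
    (pvGroups l).values = (PySem.Set.ofList (l.map (fun p => p.2))).map (pvIdxs l) := by
  have hnd : ((pvGroups l).items.map Prod.fst).Nodup := pvGroupFold_nodup l
  have hitems := pvAssoc_items ([] : List Int) (pvGroups l).items hnd
  have hvals : (pvGroups l).values = (pvGroups l).items.map (fun p => p.2) := rfl
  rw [hvals, ← hitems, List.map_map]
  have hkeys : (pvGroups l).items.map Prod.fst = PySem.Set.ofList (l.map (fun p => p.2)) :=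
    pvGroupFold_keys l
  rw [hkeys]
  refine List.map_congr_left ?_
  intro k _
  simpa using pvGroupFold_getD l k

theorem pvStepA_eq (d : PySem.Dict Int (List Int)) (p : Int × Int) :
    (if d.contains p.2 then d.modify p.2 [] (fun g => g ++ [p.1])
     else d.insert p.2 [p.1]) = d.modify p.2 [] (fun g => g ++ [p.1]) := by
  by_cases h : d.contains p.2 = true
  · simp [h]
  · simp [h, PySem.Dict.modify,
      PySem.Dict.getD_of_not_contains d ([] : List Int) (by simpa using h)]

theorem pvA_char (items : List Int) :
    find_duplicate_groups_py items
      = ((PySem.Set.ofList items).filter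
          (fun k => decide (1 < (pvIdxs (PySem.List.enumerate items) k).length))).map
          (pvIdxs (PySem.List.enumerate items)) := by
  have hA : find_duplicate_groups_py items
      = ((pvGroups (PySem.List.enumerate items)).values).filter
          (fun g => decide (1 < g.length)) := by
    rw [find_duplicate_groups_py]
    simp only [pvStepA_eq]
    rfl
  have hsnd : (PySem.List.enumerate items).map (fun p => p.2) = items :=
    PySem.List.map_snd_enumerate items 0
  rw [hA, pvGroups_values, hsnd, List.filter_map]
  rfl

-- ---------- stability of PySem.List.sorted ----------

theorem pvInsSkip (before : Int → Int → Bool) (x : Int) :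
    ∀ (as bs : List Int), (∀ a ∈ as, before x a = false) →
      PySem.List.insertBy before x (as ++ bs) = as ++ PySem.List.insertBy before x bs := by
  intro as
  induction as with
  | nil => intro bs _; rfl
  | cons a t ih =>
    intro bs h
    have ha : before x a = false := h a (by simp)
    simp only [List.cons_append, PySem.List.insertBy, ha, Bool.false_eq_true, if_neg,
      not_false_iff]
    exact congrArg (a :: ·) (ih bs (fun b hb => h b (by simp [hb])))

theorem pvInsFront (before : Int → Int → Bool) (x b : Int) (bs : List Int)
    (h : before x b = true) :
    PySem.List.insertBy before x (b :: bs) = x :: b :: bs := by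
  simp [PySem.List.insertBy, h]

theorem pvOfListConcat (l : List Int) (k : Int) :
    PySem.Set.ofList (l ++ [k])
      = if k ∈ PySem.Set.ofList l then PySem.Set.ofList l else PySem.Set.ofList l ++ [k] := by
  rw [PySem.Set.ofList_eq_foldl, PySem.Set.ofList_eq_foldl, List.foldl_append]
  simp only [List.foldl_cons, List.foldl_nil]
  by_cases hk : k ∈ l.foldl PySem.Set.add []
  · rw [← PySem.Set.ofList_eq_foldl] at hk ⊢
    simp [PySem.Set.add, PySem.Set.contains, hk]
  · rw [← PySem.Set.ofList_eq_foldl] at hk ⊢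
    have : ¬ k ∈ PySem.Set.ofList l := hk
    simp [PySem.Set.add, PySem.Set.contains, this]

theorem pvDropWhileHead (p : Int → Bool) :
    ∀ (l : List Int) (r : Int) (R' : List Int), l.dropWhile p = r :: R' → p r = false := by
  intro l
  induction l with
  | nil => intro r R' h; simp [List.dropWhile] at h
  | cons a t ih =>
    intro r R' h
    by_cases ha : p a = true
    · rw [List.dropWhile_cons_of_pos ha] at h
      exact ih r R' h
    · rw [List.dropWhile_cons_of_neg (by simpa using ha)] at h
      cases h
      simpa using ha

theorem pvFlatMapCongr {α β : Type} (l : List α) (f g : α → List β)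
    (h : ∀ a ∈ l, f a = g a) : l.flatMap f = l.flatMap g := by
  induction l with
  | nil => rfl
  | cons a t ih =>
    simp only [List.flatMap_cons, h a (by simp)]
    exact congrArg _ (ih (fun b hb => h b (by simp [hb])))

-- a stable sort groups the input by ascending distinct key values, keeping input order inside a group
theorem pvSortedStable (key : Int → Int) :
    ∀ (xs : List Int),
      PySem.List.sorted xs key
        = (PySem.List.sorted (PySem.Set.ofList (xs.map key)) (fun v => v)).flatMap
            (fun v => xs.filter (fun y => key y == v)) := by
  intro xs
  induction xs using List.reverseRecOn with
  | nil => simp [PySem.Set.ofList]; rfl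
  | append_singleton ys x ih =>
    set K := key x with hK
    set before : Int → Int → Bool := fun a b => decide (key a < key b) with hbef
    set Vy := PySem.List.sorted (PySem.Set.ofList (ys.map key)) (fun v => v) with hVy
    set F : Int → List Int := fun v => ys.filter (fun y => key y == v) with hF
    set F' : Int → List Int := fun v => (ys ++ [x]).filter (fun y => key y == v) with hF'
    have hF'eq : ∀ v, F' v = F v ++ if (K == v) = true then [x] else [] := by
      intro v
      show (ys ++ [x]).filter (fun y => key y == v)
          = ys.filter (fun y => key y == v) ++ _
      rw [List.filter_append, hK]
      by_cases h : key x = v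
      · simp [List.filter, h]
      · have hb : (key x == v) = false := by simpa using h
        simp [List.filter, hb]
    have hLHS : PySem.List.sorted (ys ++ [x]) key
        = PySem.List.insertBy before x (Vy.flatMap F) := by
      rw [PySem.List.sorted_eq_foldl_insertBy, List.foldl_append,
        ← PySem.List.sorted_eq_foldl_insertBy, ih]
      rfl
    have hVpw : Vy.Pairwise (· < ·) := PySem.List.sorted_ofList_pairwise_lt (ys.map key)
    have hkeyrun : ∀ v : Int, ∀ a ∈ F v, key a = v := by
      intro v a ha
      have := (List.mem_filter.mp ha).2
      simpa using this
    have hVmem : ∀ v, v ∈ Vy ↔ v ∈ ys.map key := by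
      intro v
      rw [hVy, PySem.List.mem_sorted]
      exact PySem.Set.mem_ofList _ _
    have hFne : ∀ v ∈ Vy, F v ≠ [] := by
      intro v hv
      obtain ⟨y, hy, hky⟩ := List.mem_map.mp ((hVmem v).mp hv)
      have : y ∈ F v := List.mem_filter.mpr ⟨hy, by simp [hky]⟩
      exact List.ne_nil_of_mem this
    set L := Vy.takeWhile (fun v => decide (v < K)) with hL
    set R := Vy.dropWhile (fun v => decide (v < K)) with hR
    have hLR : L ++ R = Vy := List.takeWhile_append_dropWhile
    have hLlt : ∀ v ∈ L, v < K := by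
      intro v hv
      have := List.mem_takeWhile_imp hv
      simpa using this
    have hsplit : Vy.flatMap F = L.flatMap F ++ R.flatMap F := by
      rw [← hLR, List.flatMap_append]
    have hskipL : ∀ a ∈ L.flatMap F, before x a = false := by
      intro a ha
      obtain ⟨v, hv, hav⟩ := List.mem_flatMap.mp ha
      have hkv : key a = v := hkeyrun v a hav
      have hvK : v < K := hLlt v hv
      rw [hbef, decide_eq_false_iff_not, hkv]
      omega
    have hmapx : (ys ++ [x]).map key = ys.map key ++ [K] := by simp [hK]
    have hKeqF : ∀ v : Int, v ≠ K → F' v = F v := by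
      intro v hv
      rw [hF'eq v]
      have : (K == v) = false := by
        rw [beq_eq_false_iff_ne]
        exact fun h => hv h.symm
      simp [this]
    rw [hLHS, hsplit, pvInsSkip before x _ _ hskipL]
    cases hRc : R with
    | nil =>
      have hLVy : L = Vy := by rw [← hLR, hRc, List.append_nil]
      have hKnot : K ∉ Vy := by
        intro hv
        exact absurd (hLlt K (by rwa [hLVy])) (lt_irrefl K)
      have hKnotMap : K ∉ ys.map key := fun h => hKnot ((hVmem K).mpr h)
      have hofl : PySem.Set.ofList ((ys ++ [x]).map key)
          = PySem.Set.ofList (ys.map key) ++ [K] := by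
        rw [hmapx, pvOfListConcat]
        have : K ∉ PySem.Set.ofList (ys.map key) :=
          fun h => hKnotMap ((PySem.Set.mem_ofList _ _).mp h)
        simp [this]
      have hV' : PySem.List.sorted (PySem.Set.ofList ((ys ++ [x]).map key)) (fun v => v)
          = Vy ++ [K] := by
        rw [hofl]
        apply PySem.List.sorted_id_eq_of_perm_of_pairwise
        · exact (PySem.List.sorted_perm _ _ _).append (List.Perm.refl [K])
        · rw [List.pairwise_append]
          refine ⟨hVpw.imp le_of_lt, List.pairwise_singleton _ _, ?_⟩
          intro a ha b hb
          simp only [List.mem_singleton] at hb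
          subst hb
          exact le_of_lt (hLlt a (by rwa [hLVy]))
      have hFK : F K = [] := by
        rw [hF, List.filter_eq_nil_iff]
        intro y hy hbeq
        exact hKnotMap (List.mem_map.mpr ⟨y, hy, by simpa using hbeq⟩)
      rw [hV', List.flatMap_append]
      have h1 : Vy.flatMap F' = Vy.flatMap F := by
        apply pvFlatMapCongr
        intro v hv
        exact hKeqF v (by intro h; subst h; exact hKnot hv)
      have h2 : [K].flatMap F' = [x] := by
        simp only [List.flatMap_cons, List.flatMap_nil, List.append_nil]
        rw [hF'eq K, hFK]
        simp
      rw [h1, h2, hLVy]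
      simp [PySem.List.insertBy]
    | cons r R' =>
      have hrnotlt : ¬ (r < K) := by
        have := pvDropWhileHead (fun v => decide (v < K)) Vy r R' (by rw [← hR, hRc])
        simpa using this
      have hVpw2 : (L ++ r :: R').Pairwise (· < ·) := by
        rw [← hRc, hLR]
        exact hVpw
      rw [List.pairwise_append] at hVpw2
      have hpwR := hVpw2.2.1
      rw [List.pairwise_cons] at hpwR
      have hrVy : r ∈ Vy := by
        rw [← hLR, hRc]
        simp
      by_cases hrK : r = K
      · -- K is already a value of ys: x joins the end of K's run
        have hskipK : ∀ a ∈ F r, before x a = false := by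
          intro a ha
          have hka : key a = r := hkeyrun r a ha
          rw [hbef, decide_eq_false_iff_not, hka]
          omega
        have hins : PySem.List.insertBy before x (R'.flatMap F) = x :: R'.flatMap F := by
          cases hR'c : R' with
          | nil => simp [PySem.List.insertBy]
          | cons v₁ T =>
            have hv₁Vy : v₁ ∈ Vy := by
              rw [← hLR, hRc, hR'c]
              simp
            cases hFv₁ : F v₁ with
            | nil => exact absurd hFv₁ (hFne v₁ hv₁Vy)
            | cons b bs =>
              have hkb : key b = v₁ := hkeyrun v₁ b (by rw [hFv₁]; simp)
              have hrv₁ : r < v₁ := hpwR.1 v₁ (by rw [hR'c]; simp)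
              have hb : before x b = true := by
                rw [hbef]
                simp only [decide_eq_true_iff]
                rw [hkb]
                omega
              rw [List.flatMap_cons, hFv₁, List.cons_append, pvInsFront before x b _ hb]
        have hKmap : r ∈ ys.map key := (hVmem r).mp hrVy
        have hofl : PySem.Set.ofList ((ys ++ [x]).map key) = PySem.Set.ofList (ys.map key) := by
          have hmem : K ∈ PySem.Set.ofList (ys.map key) := by
            rw [← hrK]
            exact (PySem.Set.mem_ofList _ _).mpr hKmap
          rw [hmapx, pvOfListConcat]
          simp [hmem]
        have hV' : PySem.List.sorted (PySem.Set.ofList ((ys ++ [x]).map key)) (fun v => v)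
            = Vy := by rw [hofl, hVy]
        rw [List.flatMap_cons, pvInsSkip before x _ _ hskipK, hins, hV', ← hLR, hRc,
          List.flatMap_append, List.flatMap_cons]
        have h1 : L.flatMap F' = L.flatMap F := by
          apply pvFlatMapCongr
          intro v hv
          exact hKeqF v (by intro h; subst h; exact absurd (hLlt _ hv) (lt_irrefl _))
        have h2 : R'.flatMap F' = R'.flatMap F := by
          apply pvFlatMapCongr
          intro v hv
          refine hKeqF v ?_
          intro h
          subst h
          have := hpwR.1 _ hv
          omega
        have h3 : F' r = F r ++ [x] := by
          rw [hF'eq r]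
          have : (K == r) = true := beq_iff_eq.mpr hrK.symm
          simp [this]
        rw [h1, h2, h3]
        simp
      · -- K is a new value, strictly between L and R
        have hKr : K < r := lt_of_le_of_ne (not_lt.mp hrnotlt) (fun h => hrK h.symm)
        have hKnot : K ∉ Vy := by
          intro hv
          rw [← hLR, hRc] at hv
          rcases List.mem_append.mp hv with h | h
          · exact absurd (hLlt K h) (lt_irrefl K)
          · rcases List.mem_cons.mp h with h | h
            · omega
            · exact absurd (hpwR.1 K h) (by omega)
        have hKnotMap : K ∉ ys.map key := fun h => hKnot ((hVmem K).mpr h)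
        have hFK : F K = [] := by
          rw [hF, List.filter_eq_nil_iff]
          intro y hy hbeq
          exact hKnotMap (List.mem_map.mpr ⟨y, hy, by simpa using hbeq⟩)
        have hofl : PySem.Set.ofList ((ys ++ [x]).map key)
            = PySem.Set.ofList (ys.map key) ++ [K] := by
          rw [hmapx, pvOfListConcat]
          have : K ∉ PySem.Set.ofList (ys.map key) :=
            fun h => hKnotMap ((PySem.Set.mem_ofList _ _).mp h)
          simp [this]
        have hV' : PySem.List.sorted (PySem.Set.ofList ((ys ++ [x]).map key)) (fun v => v)
            = L ++ K :: R := by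
          rw [hofl]
          apply PySem.List.sorted_id_eq_of_perm_of_pairwise
          · have p1 : (L ++ K :: R).Perm (L ++ (R ++ [K])) := by
              apply List.Perm.append_left
              exact List.perm_append_comm (l₁ := [K]) (l₂ := R)
            have p2 : L ++ (R ++ [K]) = (L ++ R) ++ [K] := by rw [List.append_assoc]
            have p3 : ((L ++ R) ++ [K]).Perm (PySem.Set.ofList (ys.map key) ++ [K]) := by
              rw [hLR]
              exact (PySem.List.sorted_perm _ _ _).append (List.Perm.refl [K])
            exact p1.trans (p2 ▸ p3)
          · rw [List.pairwise_append]
            refine ⟨hVpw2.1.imp le_of_lt, ?_, ?_⟩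
            · rw [List.pairwise_cons]
              constructor
              · intro v hv
                rw [hRc] at hv
                rcases List.mem_cons.mp hv with h | h
                · omega
                · have := hpwR.1 v h
                  omega
              · rw [hRc]
                exact List.Pairwise.imp le_of_lt hVpw2.2.1
            · intro a ha b hb
              have haK : a < K := hLlt a ha
              rcases List.mem_cons.mp hb with h | h
              · omega
              · rw [hRc] at h
                rcases List.mem_cons.mp h with h | h
                · omega
                · have := hpwR.1 b h
                  omega
        have hins : PySem.List.insertBy before x (R.flatMap F) = x :: R.flatMap F := by
          cases hFr : F r with
          | nil => exact absurd hFr (hFne r hrVy)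
          | cons b bs =>
            have hkb : key b = r := hkeyrun r b (by rw [hFr]; simp)
            have hb : before x b = true := by
              rw [hbef]
              simp only [decide_eq_true_iff]
              rw [hkb]
              omega
            rw [hRc, List.flatMap_cons, hFr, List.cons_append, pvInsFront before x b _ hb,
              ← List.cons_append, ← hFr, ← List.flatMap_cons, ← hRc]
        rw [← hRc, hins, hV', List.flatMap_append, List.flatMap_cons]
        have h1 : L.flatMap F' = L.flatMap F := by
          apply pvFlatMapCongr
          intro v hv
          exact hKeqF v (by intro h; subst h; exact absurd (hLlt _ hv) (lt_irrefl _))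
        have h2 : R.flatMap F' = R.flatMap F := by
          apply pvFlatMapCongr
          intro v hv
          refine hKeqF v ?_
          intro h
          subst h
          rw [hRc] at hv
          rcases List.mem_cons.mp hv with h | h
          · omega
          · exact absurd (hpwR.1 _ h) (by omega)
        have h3 : F' K = [x] := by
          rw [hF'eq K, hFK]
          simp
        rw [h1, h2, h3]
        simp

-- ---------- B-side: the run scan over the sorted index list ----------

-- the indices holding value v, in ascending order
def pvG (items : List Int) (v : Int) : List Int :=
  (PySem.List.pyRange 0 (PySem.List.len items)).filter
    (fun i => PySem.List.pyGetD items i 0 == v)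

-- the scan step of B's loop (same term as the lambda in the port)
def pvSt (items : List Int) (runs : List (List Int)) (i : Int) : List (List Int) :=
  match runs.getLast? with
  | none => runs ++ [[i]]
  | some r =>
    if PySem.List.pyGetD items (r.getLastD 0) 0 == PySem.List.pyGetD items i 0
    then runs.dropLast ++ [r ++ [i]]
    else runs ++ [[i]]

theorem pvGetLastDMem (l : List Int) (d : Int) (h : l ≠ []) : l.getLastD d ∈ l := by
  rw [List.getLastD_eq_getLast?, List.getLast?_eq_some_getLast h, Option.getD_some]
  exact List.getLast_mem h

theorem pvGMemKey (items : List Int) (v i : Int) (h : i ∈ pvG items v) :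
    PySem.List.pyGetD items i 0 = v := by
  have := (List.mem_filter.mp h).2
  simpa using this

theorem pvScanRun (items : List Int) (v : Int) :
    ∀ (r : List Int), (∀ i ∈ r, PySem.List.pyGetD items i 0 = v) →
    ∀ (pre : List (List Int)) (g : List Int), g ≠ [] →
      PySem.List.pyGetD items (g.getLastD 0) 0 = v →
      r.foldl (pvSt items) (pre ++ [g]) = pre ++ [g ++ r] := by
  intro r
  induction r with
  | nil => intro _ pre g _ _; simp
  | cons i t ih =>
    intro hr pre g hg hgl
    rw [List.foldl_cons]
    have hst : pvSt items (pre ++ [g]) i = pre ++ [g ++ [i]] := by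
      rw [pvSt]
      simp only [List.getLast?_concat]
      have hbeq : (PySem.List.pyGetD items (g.getLastD 0) 0
          == PySem.List.pyGetD items i 0) = true := by
        rw [hgl, hr i (by simp)]
        simp
      rw [hbeq]
      simp
    rw [hst, ih (fun j hj => hr j (by simp [hj])) pre (g ++ [i]) (by simp)
      (by rw [List.getLastD_concat]; exact hr i (by simp))]
    simp

theorem pvScanAll (items : List Int) :
    ∀ (Vl : List Int), Vl.Pairwise (· < ·) → (∀ v ∈ Vl, pvG items v ≠ []) →
    ∀ (w : Int), (∀ v ∈ Vl, w ≠ v) →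
    ∀ (pre : List (List Int)) (g : List Int), g ≠ [] →
      PySem.List.pyGetD items (g.getLastD 0) 0 = w →
      (Vl.flatMap (pvG items)).foldl (pvSt items) (pre ++ [g])
        = (pre ++ [g]) ++ Vl.map (pvG items) := by
  intro Vl
  induction Vl with
  | nil => intro _ _ w _ pre g _ _; simp
  | cons v Vt ih =>
    intro hpw hne w hw pre g hg hgl
    rw [List.pairwise_cons] at hpw
    rw [List.flatMap_cons, List.foldl_append]
    have hkey : ∀ j ∈ pvG items v, PySem.List.pyGetD items j 0 = v :=
      fun j hj => pvGMemKey items v j hj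
    cases hGv : pvG items v with
    | nil => exact absurd hGv (hne v (by simp))
    | cons i₀ t =>
      have hki₀ : PySem.List.pyGetD items i₀ 0 = v := hkey i₀ (by rw [hGv]; simp)
      have hst : pvSt items (pre ++ [g]) i₀ = (pre ++ [g]) ++ [[i₀]] := by
        rw [pvSt]
        simp only [List.getLast?_concat]
        have hbeq : (PySem.List.pyGetD items (g.getLastD 0) 0
            == PySem.List.pyGetD items i₀ 0) = false := by
          rw [hgl, hki₀, beq_eq_false_iff_ne]
          exact hw v (by simp)
        rw [hbeq]
        simp
      have hfold1 : (i₀ :: t).foldl (pvSt items) (pre ++ [g])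
          = (pre ++ [g]) ++ [pvG items v] := by
        rw [List.foldl_cons, hst,
          pvScanRun items v t (fun j hj => hkey j (by rw [hGv]; simp [hj]))
            (pre ++ [g]) [i₀] (by simp) (by simpa using hki₀)]
        rw [hGv]
        simp
      have hlast : PySem.List.pyGetD items ((pvG items v).getLastD 0) 0 = v :=
        hkey _ (pvGetLastDMem _ 0 (by rw [hGv]; simp))
      rw [hfold1, ih hpw.2 (fun u hu => hne u (by simp [hu])) v
        (fun u hu => ne_of_lt (hpw.1 u hu)) (pre ++ [g]) (pvG items v)
        (by rw [hGv]; simp) hlast]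
      simp

theorem pvScanFull (items : List Int) (Vl : List Int) (hpw : Vl.Pairwise (· < ·))
    (hne : ∀ v ∈ Vl, pvG items v ≠ []) :
    (Vl.flatMap (pvG items)).foldl (pvSt items) [] = Vl.map (pvG items) := by
  cases Vl with
  | nil => rfl
  | cons v Vt =>
    rw [List.pairwise_cons] at hpw
    rw [List.flatMap_cons, List.foldl_append]
    have hkey : ∀ j ∈ pvG items v, PySem.List.pyGetD items j 0 = v :=
      fun j hj => pvGMemKey items v j hj
    cases hGv : pvG items v with
    | nil => exact absurd hGv (hne v (by simp))
    | cons i₀ t =>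
      have hki₀ : PySem.List.pyGetD items i₀ 0 = v := hkey i₀ (by rw [hGv]; simp)
      have hst : pvSt items [] i₀ = [] ++ [[i₀]] := by rw [pvSt]; rfl
      have hfold1 : (i₀ :: t).foldl (pvSt items) []
          = ([] : List (List Int)) ++ [pvG items v] := by
        rw [List.foldl_cons, hst,
          pvScanRun items v t (fun j hj => hkey j (by rw [hGv]; simp [hj]))
            [] [i₀] (by simp) (by simpa using hki₀)]
        rw [hGv]
        simp
      have hlast : PySem.List.pyGetD items ((pvG items v).getLastD 0) 0 = v :=
        hkey _ (pvGetLastDMem _ 0 (by rw [hGv]; simp))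
      rw [hfold1, pvScanAll items Vt hpw.2 (fun u hu => hne u (by simp [hu])) v
        (fun u hu => ne_of_lt (hpw.1 u hu)) [] (pvG items v)
        (by rw [hGv]; simp) hlast]
      simp

-- ---------- bridges ----------

theorem pvRangeMapGet (items : List Int) :
    (PySem.List.pyRange 0 (PySem.List.len items)).map
      (fun i => PySem.List.pyGetD items i 0) = items := by
  have h1 := PySem.List.enumerate_eq_map_pyRange items 0
  have h2 := PySem.List.map_snd_enumerate items 0
  rw [h1, List.map_map] at h2
  simpa [Function.comp] using h2

theorem pvG_eq (items : List Int) (v : Int) :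
    pvG items v = pvIdxs (PySem.List.enumerate items) v := by
  rw [pvIdxs, PySem.List.enumerate_eq_map_pyRange items 0, List.filter_map, List.map_map]
  simp [pvG, Function.comp_def]

theorem pvIdxsHead (v : Int) : ∀ (l : List Int) (s : Int), v ∈ l →
    ∃ t, pvIdxs (PySem.List.enumerate l s) v = (s + (l.idxOf v : Int)) :: t := by
  intro l
  induction l with
  | nil => intro s h; cases h
  | cons a tl ih =>
    intro s hv
    rw [PySem.List.enumerate_cons]
    by_cases ha : a = v
    · refine ⟨(((PySem.List.enumerate tl (s + 1)).filter (fun p => p.2 == v)).map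
        (fun p => p.1)), ?_⟩
      subst ha
      rw [pvIdxs, List.filter_cons]
      simp [List.idxOf_cons_self]
    · have hv' : v ∈ tl := by
        rcases List.mem_cons.mp hv with h | h
        · exact absurd h.symm ha
        · exact h
      obtain ⟨t, ht⟩ := ih (s + 1) hv'
      refine ⟨t, ?_⟩
      rw [pvIdxs, List.filter_cons]
      have hne : ((a : Int) == v) = false := by simpa using ha
      simp only [hne, Bool.false_eq_true, if_neg, not_false_iff]
      rw [← pvIdxs, ht, List.idxOf_cons_ne _ ha]
      congr 1
      push_cast
      ring

theorem pvGNe (items : List Int) (v : Int) (hv : v ∈ items) : pvG items v ≠ [] := by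
  rw [pvG_eq]
  obtain ⟨t, ht⟩ := pvIdxsHead v items 0 hv
  rw [ht]
  simp

theorem pvPyGetD0 (a : Int) (t : List Int) : PySem.List.pyGetD (a :: t) 0 0 = a := by
  simp [PySem.List.pyGetD, PySem.List.pyIdx?, PySem.List.pyGet?]

theorem pvGHeadKey (items : List Int) (v : Int) (hv : v ∈ items) :
    PySem.List.pyGetD (pvG items v) 0 0 = (items.idxOf v : Int) := by
  rw [pvG_eq]
  obtain ⟨t, ht⟩ := pvIdxsHead v items 0 hv
  rw [ht, pvPyGetD0]
  simp

-- ---------- first-occurrence order of pvNd ----------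

theorem pvNdMem : ∀ (l seen : List Int) (u : Int), u ∈ pvNd seen l → u ∉ seen ∧ u ∈ l := by
  intro l
  induction l with
  | nil => intro seen u h; simp [pvNd] at h
  | cons x t ih =>
    intro seen u h
    by_cases hx : x ∈ seen
    · rw [pvNd, if_pos hx] at h
      obtain ⟨h1, h2⟩ := ih seen u h
      exact ⟨h1, by simp [h2]⟩
    · rw [pvNd, if_neg hx] at h
      rcases List.mem_cons.mp h with h | h
      · subst h
        exact ⟨hx, by simp⟩
      · obtain ⟨h1, h2⟩ := ih (seen ++ [x]) u h
        exact ⟨fun hc => h1 (by simp [hc]), by simp [h2]⟩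

theorem pvIdxOfConsNe (u x : Int) (t : List Int) (h : u ≠ x) :
    List.idxOf u (x :: t) = List.idxOf u t + 1 := by
  exact List.idxOf_cons_ne t (fun hc => h hc.symm)

theorem pvNdPairwise : ∀ (l seen : List Int),
    (pvNd seen l).Pairwise (fun u w => List.idxOf u l < List.idxOf w l) := by
  intro l
  induction l with
  | nil => intro seen; simp [pvNd]
  | cons x t ih =>
    intro seen
    by_cases hx : x ∈ seen
    · rw [pvNd, if_pos hx]
      refine List.Pairwise.imp_of_mem ?_ (ih seen)
      intro u w hu hw huw
      have hux : u ≠ x := fun h => (pvNdMem t seen u hu).1 (h ▸ hx)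
      have hwx : w ≠ x := fun h => (pvNdMem t seen w hw).1 (h ▸ hx)
      rw [pvIdxOfConsNe u x t hux, pvIdxOfConsNe w x t hwx]
      omega
    · rw [pvNd, if_neg hx]
      rw [List.pairwise_cons]
      constructor
      · intro u hu
        have hux : u ≠ x := fun h => (pvNdMem t (seen ++ [x]) u hu).1 (by simp [h])
        rw [List.idxOf_cons_self, pvIdxOfConsNe u x t hux]
        omega
      · refine List.Pairwise.imp_of_mem ?_ (ih (seen ++ [x]))
        intro u w hu hw huw
        have hux : u ≠ x := fun h => (pvNdMem t _ u hu).1 (by simp [h])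
        have hwx : w ≠ x := fun h => (pvNdMem t _ w hw).1 (by simp [h])
        rw [pvIdxOfConsNe u x t hux, pvIdxOfConsNe w x t hwx]
        omega

theorem pvMain (items : List Int) :
    find_duplicate_groups_py items = find_duplicate_groups_py_alt items := by
  have hVpw : (PySem.List.sorted (PySem.Set.ofList items) (fun v => v)).Pairwise (· < ·) :=
    PySem.List.sorted_ofList_pairwise_lt items
  have hVne : ∀ v ∈ PySem.List.sorted (PySem.Set.ofList items) (fun v => v),
      pvG items v ≠ [] := by
    intro v hv
    exact pvGNe items v
      ((PySem.Set.mem_ofList items v).mp ((PySem.List.mem_sorted _ _ _ _).mp hv))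
  have horder : PySem.List.sorted (PySem.List.pyRange 0 (PySem.List.len items))
      (fun i => PySem.List.pyGetD items i 0)
      = (PySem.List.sorted (PySem.Set.ofList items) (fun v => v)).flatMap (pvG items) := by
    rw [pvSortedStable, pvRangeMapGet]
    rfl
  have hB : find_duplicate_groups_py_alt items
      = PySem.List.sorted
          (((PySem.List.sorted (PySem.Set.ofList items) (fun v => v)).filter
              (fun v => decide (1 < (pvG items v).length))).map (pvG items))
          (fun run => PySem.List.pyGetD run 0 0) := by
    show PySem.List.sorted
        (((PySem.List.sorted (PySem.List.pyRange 0 (PySem.List.len items))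
            (fun i => PySem.List.pyGetD items i 0)).foldl (pvSt items) []).filter
          (fun run => decide (1 < run.length)))
        (fun run => PySem.List.pyGetD run 0 0) = _
    rw [horder, pvScanFull items _ hVpw hVne, List.filter_map]
    rfl
  have hfun : pvIdxs (PySem.List.enumerate items) = pvG items :=
    funext (fun v => (pvG_eq items v).symm)
  have hA : find_duplicate_groups_py items
      = ((pvNd [] items).filter (fun v => decide (1 < (pvG items v).length))).map
          (pvG items) := by
    rw [pvA_char, hfun, pvSet_ofList_eq_nd]
  have hperm : (((pvNd [] items).filter (fun v => decide (1 < (pvG items v).length))).map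
        (pvG items)).Perm
      (((PySem.List.sorted (PySem.Set.ofList items) (fun v => v)).filter
          (fun v => decide (1 < (pvG items v).length))).map (pvG items)) := by
    apply List.Perm.map
    apply List.Perm.filter
    have h2 : (pvNd [] items).Perm (PySem.Set.ofList items) := by
      rw [pvSet_ofList_eq_nd]
    exact h2.trans (PySem.List.sorted_perm _ _ _).symm
  have hpw : (((pvNd [] items).filter (fun v => decide (1 < (pvG items v).length))).map
        (pvG items)).Pairwise
      (fun r₁ r₂ => PySem.List.pyGetD r₁ 0 0 < PySem.List.pyGetD r₂ 0 0) := by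
    rw [List.pairwise_map]
    refine List.Pairwise.imp_of_mem ?_
      ((pvNdPairwise items []).filter (fun v => decide (1 < (pvG items v).length)))
    intro u w hu hw huw
    have humem : u ∈ items := (pvNdMem items [] u (List.mem_of_mem_filter hu)).2
    have hwmem : w ∈ items := (pvNdMem items [] w (List.mem_of_mem_filter hw)).2
    rw [pvGHeadKey items u humem, pvGHeadKey items w hwmem]
    exact_mod_cast huw
  rw [hA, hB, PySem.List.sorted_eq_of_perm_of_pairwise_lt _ _ _ hperm hpw]

-- ===== VERDICT (by name: the statement is the Claim_ definition above) =====
theorem find_duplicate_groups_py_spec : Claim_equal_find_duplicate_groups_py := by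
  intro items _
  unfold Spec_find_duplicate_groups_py
  exact pvMain items
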